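-- pv_equiv track=rewrite | github.com/dtcenter/METplus | metplus/util/met_util.py | replace_output_prefix
-- ===== SOURCE A (Python) =====
-- def replace_output_prefix(line):
--     op_replacements = {'${MODEL}': '{MODEL}',
--                        '${FCST_VAR}': '{CURRENT_FCST_NAME}',
--                        '${OBTYPE}': '{OBTYPE}',
--                        '${OBS_VAR}': '{CURRENT_OBS_NAME}',
--                        '${LEVEL}': '{CURRENT_FCST_LEVEL}',
--                        '${FCST_TIME}': '{lead?fmt=%3H}',
--                        }
--     prefix = line.split('=')[1].strip().rstrip(';').strip('"')
--     for key, value, in op_replacements.items():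
--         prefix = prefix.replace(key, value)
--
--     return prefix
-- ===== SOURCE B (Python) =====
-- def replace_output_prefix(line):
--     op_replacements = {'${MODEL}': '{MODEL}',
--                        '${FCST_VAR}': '{CURRENT_FCST_NAME}',
--                        '${OBTYPE}': '{OBTYPE}',
--                        '${OBS_VAR}': '{CURRENT_OBS_NAME}',
--                        '${LEVEL}': '{CURRENT_FCST_LEVEL}',
--                        '${FCST_TIME}': '{lead?fmt=%3H}',
--                        }
--     prefix = line.split('=')[1].strip().rstrip(';').strip('"')
--     out = []
--     i = 0
--     n = len(prefix)
--     while i < n: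
--         for key, value in op_replacements.items():
--             if prefix.startswith(key, i):
--                 out.append(value)
--                 i += len(key)
--                 break
--         else:
--             out.append(prefix[i])
--             i += 1
--     return ''.join(out)
-- ===== Notes on version B (the rewrite author's own statement) =====
-- stated objective: alternative
-- what changed: The six sequential full-string .replace passes are replaced by a single left-to-right scan that, at each position, tries the token table in order, emits the replacement on a match and jumps past the matched key (equal because the keys are prefix-free, contain '$' only at position 0, and no replacement value can recreate or extend a key match).
import Mathlib
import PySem

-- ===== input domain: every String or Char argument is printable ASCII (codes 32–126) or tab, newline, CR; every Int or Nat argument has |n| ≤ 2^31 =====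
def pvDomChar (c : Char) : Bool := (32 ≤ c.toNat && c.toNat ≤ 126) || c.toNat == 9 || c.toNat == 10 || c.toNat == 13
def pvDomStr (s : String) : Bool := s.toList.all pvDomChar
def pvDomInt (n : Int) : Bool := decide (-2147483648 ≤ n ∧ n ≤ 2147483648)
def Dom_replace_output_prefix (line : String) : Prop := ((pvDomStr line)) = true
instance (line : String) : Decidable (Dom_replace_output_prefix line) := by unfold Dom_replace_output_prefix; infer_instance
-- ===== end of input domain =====

-- B replaces A's six sequential full-string .replace passes by ONE left-to-right scan that matches the
-- token table at each position (same extraction chain, same return value); objective: alternative single-pass algorithm.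

-- ===== PORT A =====
-- str.rstrip(chars) has no PySem primitive: hand port, exact (drops trailing chars that are in `chars`)
def pyRstripChars (s : String) (chars : String) : String :=
  String.ofList ((s.toList.reverse.dropWhile (fun c => chars.toList.contains c)).reverse)

def replace_output_prefix (line : String) : String :=
  let op_replacements : List (String × String) :=
    [("${MODEL}", "{MODEL}"), ("${FCST_VAR}", "{CURRENT_FCST_NAME}"),
     ("${OBTYPE}", "{OBTYPE}"), ("${OBS_VAR}", "{CURRENT_OBS_NAME}"),
     ("${LEVEL}", "{CURRENT_FCST_LEVEL}"), ("${FCST_TIME}", "{lead?fmt=%3H}")]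
  match PySem.List.pyGet? ((PySem.Str.split? line "=").getD []) 1 with
  | none => ""      -- line.split('=')[1] raises IndexError when '=' is absent (outside Pre_)
  | some part =>
    op_replacements.foldl (fun pfx kv => PySem.Str.replace pfx kv.1 kv.2)
      (PySem.Str.stripChars (pyRstripChars (PySem.Str.strip part) ";") "\"")

-- ===== PORT B =====
def pvTable : List (List Char × List Char) :=
  [("${MODEL}".toList, "{MODEL}".toList), ("${FCST_VAR}".toList, "{CURRENT_FCST_NAME}".toList),
   ("${OBTYPE}".toList, "{OBTYPE}".toList), ("${OBS_VAR}".toList, "{CURRENT_OBS_NAME}".toList),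
   ("${LEVEL}".toList, "{CURRENT_FCST_LEVEL}".toList), ("${FCST_TIME}".toList, "{lead?fmt=%3H}".toList)]

-- Source B's while-loop: at each position try the table entries in order (for…break);
-- on a match emit the value and jump len(key), otherwise emit the char.  fuel = remaining length.
def pvScanGo (tbl : List (List Char × List Char)) : Nat → List Char → List Char
  | _, [] => []
  | 0, rest => rest
  | fuel+1, c :: cs =>
    match tbl.find? (fun kv => kv.1.isPrefixOf (c :: cs)) with
    | some kv => kv.2 ++ pvScanGo tbl fuel ((c :: cs).drop kv.1.length)
    | none => c :: pvScanGo tbl fuel cs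

def replace_output_prefix_alt (line : String) : String :=
  match PySem.List.pyGet? ((PySem.Str.split? line "=").getD []) 1 with
  | none => ""      -- same extraction: IndexError when '=' is absent (outside Pre_)
  | some part =>
    let pfx := PySem.Str.stripChars (pyRstripChars (PySem.Str.strip part) ";") "\""
    String.ofList (pvScanGo pvTable pfx.toList.length pfx.toList)

-- ===== PRECONDITION & SPEC =====
-- Pre_ excludes exactly the inputs where line.split('=')[1] raises IndexError: lines with no '='.
def Pre_replace_output_prefix (line : String) : Prop := PySem.Str.isIn "=" line = true
instance (line : String) : Decidable (Pre_replace_output_prefix line) := by unfold Pre_replace_output_prefix; infer_instance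
def pvWitness_replace_output_prefix : String := "OUTPUT_PREFIX = \"${MODEL}_${LEVEL}\";"

def Spec_replace_output_prefix (line : String) (out : String) : Prop := out = replace_output_prefix_alt line
instance (line : String) (out : String) : Decidable (Spec_replace_output_prefix line out) := by unfold Spec_replace_output_prefix; infer_instance

-- ===== CLAIM (what is proved, stated in full; the proofs are below) =====
def Claim_equal_replace_output_prefix : Prop := ∀ (line : String), Dom_replace_output_prefix line → Pre_replace_output_prefix line → Spec_replace_output_prefix line (replace_output_prefix line)

-- ===== LEMMAS AND PROOFS =====

def pvScanS (tbl : List (List Char × List Char)) (s : List Char) : List Char :=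
  pvScanGo tbl s.length s
def pvTblOK (tbl : List (List Char × List Char)) : Prop :=
  ∀ kv ∈ tbl, kv.1.head? = some '$' ∧ kv.1.tail ≠ [] ∧ '$' ∉ kv.1.tail ∧ '$' ∉ kv.2

theorem pv_fuel_eq (tbl : List (List Char × List Char))
    (hK : ∀ kv ∈ tbl, kv.1 ≠ []) :
    ∀ fuel (s : List Char), s.length ≤ fuel → pvScanGo tbl fuel s = pvScanS tbl s := by
  intro fuel
  induction fuel using Nat.strong_induction_on with
  | _ fuel ih =>
    intro s hs
    match fuel, s with
    | _, [] => cases fuel <;> simp [pvScanGo, pvScanS]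
    | 0, c :: cs => simp at hs
    | fuel+1, c :: cs =>
      simp only [List.length_cons] at hs
      rw [pvScanS]
      simp only [List.length_cons]
      rw [pvScanGo, pvScanGo]
      cases hf : tbl.find? (fun kv => kv.1.isPrefixOf (c :: cs)) with
      | none =>
        simp only []
        rw [ih fuel (by omega) cs (by omega), ih cs.length (by omega) cs (le_refl _)]
      | some kv =>
        simp only []
        have hmem := List.mem_of_find?_eq_some hf
        have hk1 : kv.1 ≠ [] := hK kv hmem
        have hdl : ((c :: cs).drop kv.1.length).length ≤ cs.length := by
          simp only [List.length_drop, List.length_cons]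
          have : 1 ≤ kv.1.length := List.length_pos_of_ne_nil hk1
          omega
        rw [ih fuel (by omega) _ (le_trans hdl (by omega)),
            ih cs.length (by omega) _ hdl]

theorem pv_go_eq (k v : List Char) :
    ∀ fuel (l acc : List Char),
      PySem.Chars.replace.go k v fuel l acc = acc.reverse ++ pvScanGo [(k, v)] fuel l := by
  intro fuel
  induction fuel with
  | zero => intro l acc; cases l <;> simp [PySem.Chars.replace.go, pvScanGo]
  | succ fuel ih =>
    intro l acc
    cases l with
    | nil => simp [PySem.Chars.replace.go, pvScanGo]
    | cons c t =>
      rw [PySem.Chars.replace.go, pvScanGo]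
      by_cases hp : k.isPrefixOf (c :: t) = true
      · simp only [hp, if_true, List.find?_cons]
        rw [ih]
        simp
      · simp only [Bool.not_eq_true] at hp
        rw [List.find?_cons_of_neg (by simp [hp]), List.find?_nil]
        simp [hp, ih]

theorem pv_replace_eq (k v : List Char) (hk : k ≠ []) (s : List Char) :
    PySem.Chars.replace s k v = pvScanS [(k, v)] s := by
  rw [PySem.Chars.replace]
  simp only [List.isEmpty_iff, hk, if_false]
  rw [pv_go_eq, pvScanS]
  simp

theorem pv_key_cons {tbl : List (List Char × List Char)} (hT : pvTblOK tbl)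
    {kv : List Char × List Char} (hkv : kv ∈ tbl) : kv.1 = '$' :: kv.1.tail := by
  obtain ⟨h1, -, -, -⟩ := hT kv hkv
  cases h : kv.1 with
  | nil => rw [h] at h1; simp at h1
  | cons a l =>
    have h1' : a = '$' := by rw [h] at h1; simpa using h1
    simp [h1']

theorem pv_find_none_of_ne {tbl : List (List Char × List Char)} (hT : pvTblOK tbl)
    {c : Char} (hc : c ≠ '$') (rest : List Char) :
    tbl.find? (fun kv => kv.1.isPrefixOf (c :: rest)) = none := by
  rw [List.find?_eq_none]
  intro kv hkv
  rw [pv_key_cons hT hkv]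
  simp [List.isPrefixOf, Ne.symm hc]

theorem pv_scanS_cons_none {tbl : List (List Char × List Char)} {c : Char} {cs : List Char}
    (h : tbl.find? (fun kv => kv.1.isPrefixOf (c :: cs)) = none) :
    pvScanS tbl (c :: cs) = c :: pvScanS tbl cs := by
  rw [pvScanS]
  simp only [List.length_cons]
  rw [pvScanGo, h]
  rfl

theorem pv_scanS_cons_some {tbl : List (List Char × List Char)} {c : Char} {cs : List Char}
    (hK : ∀ kv ∈ tbl, kv.1 ≠ []) {kv : List Char × List Char}
    (h : tbl.find? (fun kv => kv.1.isPrefixOf (c :: cs)) = some kv) :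
    pvScanS tbl (c :: cs) = kv.2 ++ pvScanS tbl ((c :: cs).drop kv.1.length) := by
  rw [pvScanS]
  simp only [List.length_cons]
  rw [pvScanGo, h]
  show kv.2 ++ pvScanGo tbl cs.length ((c :: cs).drop kv.1.length) = _
  have hk1 : kv.1 ≠ [] := hK kv (List.mem_of_find?_eq_some h)
  have hlen : ((c :: cs).drop kv.1.length).length ≤ cs.length := by
    have := List.length_pos_of_ne_nil hk1
    simp only [List.length_drop, List.length_cons]
    omega
  rw [pv_fuel_eq tbl hK cs.length _ hlen]

theorem pv_push (tbl : List (List Char × List Char)) (hT : pvTblOK tbl) :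
    ∀ (x y : List Char), '$' ∉ x → pvScanS tbl (x ++ y) = x ++ pvScanS tbl y := by
  intro x
  induction x with
  | nil => simp
  | cons c x' ih =>
    intro y hx
    have hc : c ≠ '$' := by intro h; exact hx (by simp [h])
    have hx' : '$' ∉ x' := by intro h; exact hx (by simp [h])
    rw [List.cons_append, pv_scanS_cons_none (pv_find_none_of_ne hT hc _), ih y hx']
    simp

theorem pv_keys_ne {tbl : List (List Char × List Char)} (hT : pvTblOK tbl) :
    ∀ kv ∈ tbl, kv.1 ≠ [] := by
  intro kv h
  rw [pv_key_cons hT h]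
  simp

theorem pv_not_prefix_append {x y : List Char} (z : List Char)
    (h1 : ¬ x <+: y) (h2 : ¬ y <+: x) : ¬ x <+: y ++ z := by
  intro h
  rcases le_or_gt x.length y.length with hl | hl
  · exact h1 (List.prefix_of_prefix_length_le h (List.prefix_append y z) hl)
  · exact h2 (List.prefix_of_prefix_length_le (List.prefix_append y z) h (by omega))

theorem pv_no_new_match (tbl : List (List Char × List Char)) (hT : pvTblOK tbl)
    (w : List Char)
    (hcross : ∀ kv ∈ tbl, ∀ m, m < w.length →
      ¬ (List.drop m w <+: kv.2) ∧ ¬ (kv.2 <+: List.drop m w)) :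
    ∀ fuel (t : List Char) (m : Nat), t.length ≤ fuel → m < w.length →
      (List.drop m w) <+: pvScanGo tbl fuel t → (List.drop m w) <+: t := by
  intro fuel
  induction fuel using Nat.strong_induction_on with
  | _ fuel ih =>
    intro t m ht hm hpre
    match fuel, t with
    | fuel, [] =>
      have hne : w.drop m ≠ [] := by
        intro h
        have := List.drop_eq_nil_iff.mp h
        omega
      cases fuel <;> simp only [pvScanGo] at hpre <;>
        exact absurd (List.prefix_nil.mp hpre) hne
    | 0, c :: cs => simp at ht
    | fuel+1, c :: cs =>
      have hfe : pvScanGo tbl (fuel+1) (c :: cs) = pvScanS tbl (c :: cs) :=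
        pv_fuel_eq tbl (pv_keys_ne hT) (fuel+1) _ (by simpa using ht)
      rw [hfe] at hpre
      cases hf : tbl.find? (fun kv => kv.1.isPrefixOf (c :: cs)) with
      | some kv =>
        rw [pv_scanS_cons_some (pv_keys_ne hT) hf] at hpre
        obtain ⟨hc1, hc2⟩ := hcross kv (List.mem_of_find?_eq_some hf) m hm
        exact absurd hpre (pv_not_prefix_append _ hc1 hc2)
      | none =>
        rw [pv_scanS_cons_none hf] at hpre
        have hdm : w.drop m = w[m] :: w.drop (m+1) := List.drop_eq_getElem_cons hm
        rw [hdm] at hpre ⊢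
        rcases List.cons_prefix_cons.mp hpre with ⟨hc, htail⟩
        subst hc
        by_cases hend : m + 1 < w.length
        · have hcs : cs.length ≤ fuel := by simpa using ht
          have hscs : pvScanS tbl cs = pvScanGo tbl fuel cs :=
            (pv_fuel_eq tbl (pv_keys_ne hT) fuel cs hcs).symm
          rw [hscs] at htail
          have := ih fuel (by omega) cs (m+1) hcs hend htail
          exact List.cons_prefix_cons.mpr ⟨rfl, this⟩
        · have hnil : w.drop (m+1) = [] := List.drop_eq_nil_iff.mpr (by omega)
          rw [hnil]
          exact List.cons_prefix_cons.mpr ⟨rfl, List.nil_prefix⟩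

theorem pv_snoc (tbl : List (List Char × List Char)) (hT : pvTblOK tbl)
    (k v w : List Char) (hk : k = '$' :: w) (hw0 : w ≠ []) (hw : '$' ∉ w) (hv : '$' ∉ v)
    (hcross : ∀ kv ∈ tbl, ∀ m, m < w.length →
      ¬ (List.drop m w <+: kv.2) ∧ ¬ (kv.2 <+: List.drop m w)) :
    ∀ fuel (s : List Char), s.length ≤ fuel →
      pvScanS [(k, v)] (pvScanS tbl s) = pvScanS (tbl ++ [(k, v)]) s := by
  have hTk : pvTblOK [(k, v)] := by
    intro kv hkv
    simp only [List.mem_singleton] at hkv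
    subst hkv
    refine ⟨?_, ?_, ?_, hv⟩ <;> simp [hk, hw0, hw]
  have hTapp : pvTblOK (tbl ++ [(k, v)]) := by
    intro kv hkv
    rcases List.mem_append.mp hkv with h | h
    · exact hT kv h
    · exact hTk kv h
  intro fuel
  induction fuel using Nat.strong_induction_on with
  | _ fuel ih =>
    intro s hs
    match fuel, s with
    | fuel, [] => simp [pvScanS, pvScanGo]
    | 0, c :: cs => simp at hs
    | fuel+1, c :: cs =>
      simp only [List.length_cons] at hs
      cases hf : tbl.find? (fun kv => kv.1.isPrefixOf (c :: cs)) with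
      | some kv0 =>
        have hmem := List.mem_of_find?_eq_some hf
        have hk0 : kv0.1 ≠ [] := pv_keys_ne hT kv0 hmem
        have hXlen : ((c :: cs).drop kv0.1.length).length ≤ cs.length := by
          have := List.length_pos_of_ne_nil hk0
          simp only [List.length_drop, List.length_cons]; omega
        rw [pv_scanS_cons_some (pv_keys_ne hT) hf,
            pv_push [(k, v)] hTk kv0.2 _ (hT kv0 hmem).2.2.2,
            ih fuel (by omega) _ (by omega)]
        have hfapp : (tbl ++ [(k, v)]).find? (fun kv => kv.1.isPrefixOf (c :: cs)) = some kv0 := by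
          rw [List.find?_append, hf]; rfl
        rw [pv_scanS_cons_some (pv_keys_ne hTapp) hfapp]
      | none =>
        by_cases hkp : k.isPrefixOf (c :: cs) = true
        · -- k matches here
          obtain ⟨t, hct⟩ := List.isPrefixOf_iff_prefix.mp hkp
          rw [hk] at hct
          have hc : c = '$' := by
            have := hct
            simp only [List.cons_append, List.cons.injEq] at this
            exact this.1.symm
          have hcs : cs = w ++ t := by
            have := hct
            simp only [List.cons_append, List.cons.injEq] at this
            exact this.2.symm
          subst hc
          have htlen : t.length ≤ fuel := by
            rw [hcs] at hs; simp at hs; omega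
          rw [pv_scanS_cons_none hf, hcs, pv_push tbl hT w _ hw]
          have hstep : pvScanS [(k, v)] ('$' :: (w ++ pvScanS tbl t))
              = v ++ pvScanS [(k, v)] (pvScanS tbl t) := by
            have hpf : k.isPrefixOf ('$' :: (w ++ pvScanS tbl t)) = true := by
              rw [List.isPrefixOf_iff_prefix, hk]
              exact ⟨pvScanS tbl t, by simp⟩
            have hf2 : [(k, v)].find? (fun kv => kv.1.isPrefixOf ('$' :: (w ++ pvScanS tbl t))) = some (k, v) := by
              simp [List.find?, hpf]
            rw [pv_scanS_cons_some (pv_keys_ne hTk) hf2]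
            congr 1
            rw [hk]
            simp
          rw [hstep, ih fuel (by omega) t htlen]
          have hfapp : (tbl ++ [(k, v)]).find? (fun kv => kv.1.isPrefixOf ('$' :: (w ++ t))) = some (k, v) := by
            rw [List.find?_append, ← hcs, hf]
            simp only [Option.none_or]
            rw [hcs]
            have : k.isPrefixOf ('$' :: (w ++ t)) = true := by
              rw [List.isPrefixOf_iff_prefix, hk]
              exact ⟨t, by simp⟩
            simp [List.find?, this]
          rw [pv_scanS_cons_some (pv_keys_ne hTapp) hfapp]
          congr 1
          rw [hk]
          simp
        · -- no key matches at this position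
          have hfk : [(k, v)].find? (fun kv => kv.1.isPrefixOf (c :: cs)) = none := by
            simp [List.find?, hkp]
          have hfapp : (tbl ++ [(k, v)]).find? (fun kv => kv.1.isPrefixOf (c :: cs)) = none := by
            rw [List.find?_append, hf, hfk]; rfl
          rw [pv_scanS_cons_none hf]
          have hfk2 : [(k, v)].find? (fun kv => kv.1.isPrefixOf (c :: pvScanS tbl cs)) = none := by
            by_cases hc : c = '$'
            · subst hc
              have : ¬ k.isPrefixOf ('$' :: pvScanS tbl cs) = true := by
                intro hpre
                rw [List.isPrefixOf_iff_prefix, hk, List.cons_prefix_cons] at hpre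
                have hwZ : w <+: pvScanS tbl cs := hpre.2
                have h0 : w.drop 0 <+: pvScanGo tbl cs.length cs := by
                  simpa [pvScanS] using hwZ
                have := pv_no_new_match tbl hT w hcross cs.length cs 0 (le_refl _)
                  (by have := List.length_pos_of_ne_nil hw0; omega) h0
                simp only [List.drop_zero] at this
                apply hkp
                rw [List.isPrefixOf_iff_prefix, hk, List.cons_prefix_cons]
                exact ⟨rfl, this⟩
              simp [List.find?, this]
            · exact pv_find_none_of_ne hTk hc _
          rw [pv_scanS_cons_none hfk2, ih fuel (by omega) cs (by omega),
              pv_scanS_cons_none hfapp]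

theorem pv_cascade (s : List Char) :
    PySem.Chars.replace (PySem.Chars.replace (PySem.Chars.replace (PySem.Chars.replace (PySem.Chars.replace (PySem.Chars.replace s
      "${MODEL}".toList "{MODEL}".toList) "${FCST_VAR}".toList "{CURRENT_FCST_NAME}".toList)
      "${OBTYPE}".toList "{OBTYPE}".toList) "${OBS_VAR}".toList "{CURRENT_OBS_NAME}".toList)
      "${LEVEL}".toList "{CURRENT_FCST_LEVEL}".toList) "${FCST_TIME}".toList "{lead?fmt=%3H}".toList
    = pvScanS pvTable s := by
  rw [pv_replace_eq _ _ (by decide), pv_replace_eq _ _ (by decide), pv_replace_eq _ _ (by decide),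
      pv_replace_eq _ _ (by decide), pv_replace_eq _ _ (by decide), pv_replace_eq _ _ (by decide)]
  rw [pv_snoc [("${MODEL}".toList, "{MODEL}".toList)] (by unfold pvTblOK; decide)
        "${FCST_VAR}".toList "{CURRENT_FCST_NAME}".toList "{FCST_VAR}".toList
        (by decide) (by decide) (by decide) (by decide) (by decide) _ _ (le_refl _)]
  simp only [List.cons_append, List.nil_append]
  rw [pv_snoc [("${MODEL}".toList, "{MODEL}".toList), ("${FCST_VAR}".toList, "{CURRENT_FCST_NAME}".toList)] (by unfold pvTblOK; decide)
        "${OBTYPE}".toList "{OBTYPE}".toList "{OBTYPE}".toList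
        (by decide) (by decide) (by decide) (by decide) (by decide) _ _ (le_refl _)]
  simp only [List.cons_append, List.nil_append]
  rw [pv_snoc [("${MODEL}".toList, "{MODEL}".toList), ("${FCST_VAR}".toList, "{CURRENT_FCST_NAME}".toList),
        ("${OBTYPE}".toList, "{OBTYPE}".toList)] (by unfold pvTblOK; decide)
        "${OBS_VAR}".toList "{CURRENT_OBS_NAME}".toList "{OBS_VAR}".toList
        (by decide) (by decide) (by decide) (by decide) (by decide) _ _ (le_refl _)]
  simp only [List.cons_append, List.nil_append]
  rw [pv_snoc [("${MODEL}".toList, "{MODEL}".toList), ("${FCST_VAR}".toList, "{CURRENT_FCST_NAME}".toList),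
        ("${OBTYPE}".toList, "{OBTYPE}".toList), ("${OBS_VAR}".toList, "{CURRENT_OBS_NAME}".toList)] (by unfold pvTblOK; decide)
        "${LEVEL}".toList "{CURRENT_FCST_LEVEL}".toList "{LEVEL}".toList
        (by decide) (by decide) (by decide) (by decide) (by decide) _ _ (le_refl _)]
  simp only [List.cons_append, List.nil_append]
  rw [pv_snoc [("${MODEL}".toList, "{MODEL}".toList), ("${FCST_VAR}".toList, "{CURRENT_FCST_NAME}".toList),
        ("${OBTYPE}".toList, "{OBTYPE}".toList), ("${OBS_VAR}".toList, "{CURRENT_OBS_NAME}".toList),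
        ("${LEVEL}".toList, "{CURRENT_FCST_LEVEL}".toList)] (by unfold pvTblOK; decide)
        "${FCST_TIME}".toList "{lead?fmt=%3H}".toList "{FCST_TIME}".toList
        (by decide) (by decide) (by decide) (by decide) (by decide) _ _ (le_refl _)]
  simp only [List.cons_append, List.nil_append]
  rfl

theorem pv_main (line : String) : replace_output_prefix line = replace_output_prefix_alt line := by
  unfold replace_output_prefix replace_output_prefix_alt
  cases h : PySem.List.pyGet? ((PySem.Str.split? line "=").getD []) 1 with
  | none => rfl
  | some part =>
    simp only []
    set pfx := PySem.Str.stripChars (pyRstripChars (PySem.Str.strip part) ";") "\"" with hpfx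
    simp only [List.foldl_cons, List.foldl_nil]
    have hL : (PySem.Str.replace (PySem.Str.replace (PySem.Str.replace (PySem.Str.replace (PySem.Str.replace (PySem.Str.replace pfx
        "${MODEL}" "{MODEL}") "${FCST_VAR}" "{CURRENT_FCST_NAME}") "${OBTYPE}" "{OBTYPE}")
        "${OBS_VAR}" "{CURRENT_OBS_NAME}") "${LEVEL}" "{CURRENT_FCST_LEVEL}") "${FCST_TIME}" "{lead?fmt=%3H}").toList
        = pvScanS pvTable pfx.toList := by
      simp only [PySem.Str.toList_replace]
      exact pv_cascade pfx.toList
    calc _ = String.ofList (pvScanS pvTable pfx.toList) := by rw [← hL, String.ofList_toList]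
      _ = _ := rfl

-- ===== VERDICT (by name: the statement is the Claim_ definition above) =====
theorem replace_output_prefix_spec : Claim_equal_replace_output_prefix := by
  intro line _ _
  show replace_output_prefix line = replace_output_prefix_alt line
  exact pv_main line
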